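-- pv_equiv track=rewrite | github.com/johnnyhsu1106/lintcode-solution-in-python | 138_subarray_sum.py | subarraySum_1
-- ===== SOURCE A (Python) =====
-- def subarraySum_1(nums):
--     '''
--     idea:
--     Time: O(n^2).. not good
--     Speace: O(1)
--     '''
--     result = []
--     for i in range(len(nums)):
--         total = 0
--         for j in range(i, len(nums)):
--             total += nums[j]
--             if total == 0:
--                 return [i, j]
--     return result
-- ===== SOURCE B (Python) =====
-- def subarraySum_1(nums):
--     # O(n) prefix-sum scan: a zero subarray [i, j] means prefix sums at i and
--     # j+1 are equal; track first occurrence of each prefix value and, at each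
--     # value's second occurrence, keep the candidate with the smallest start.
--     first = {0: 0}
--     repeated = set()
--     best = None
--     p = 0
--     for k, x in enumerate(nums):
--         p += x
--         if p in first:
--             if p not in repeated:
--                 repeated.add(p)
--                 f = first[p]
--                 if best is None or f < best[0]:
--                     best = (f, k)
--         else:
--             first[p] = k + 1
--     return [] if best is None else [best[0], best[1]]
-- ===== Notes on version B (the rewrite author's own statement) =====
-- stated objective: faster
-- what changed: Replaced the O(n^2) scan over all start indices by a single O(n) pass over prefix sums with a first-occurrence dict: a zero subarray [i,j] is a repeated prefix value, and the answer is the repeating prefix value with the smallest first occurrence, paired with its second occurrence.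
import Mathlib
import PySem

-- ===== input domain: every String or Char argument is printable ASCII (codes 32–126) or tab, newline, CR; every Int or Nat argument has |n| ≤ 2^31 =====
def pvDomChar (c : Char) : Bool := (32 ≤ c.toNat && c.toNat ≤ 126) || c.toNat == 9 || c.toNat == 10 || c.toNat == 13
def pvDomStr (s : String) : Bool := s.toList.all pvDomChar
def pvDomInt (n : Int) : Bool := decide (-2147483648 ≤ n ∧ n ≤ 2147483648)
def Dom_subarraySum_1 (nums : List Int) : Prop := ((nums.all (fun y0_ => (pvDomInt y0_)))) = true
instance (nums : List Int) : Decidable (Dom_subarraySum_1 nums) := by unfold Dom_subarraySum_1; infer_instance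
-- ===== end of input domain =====

-- B replaces A's quadratic double loop by a single pass over prefix sums with a
-- first-occurrence dictionary (objective: faster; the ports are proved to agree on all inputs).

-- ===== PORT A =====
-- A's inner loop: j from its current value to len(nums), accumulating total, early return
def aInner (nums : List Int) (i : Nat) (total : Int) (j : Nat) : Option (Nat × Nat) :=
  if h : j < nums.length then
    let t := total + nums[j]
    if t = 0 then some (i, j) else aInner nums i t (j + 1)
  else none
termination_by nums.length - j
def aOuter (nums : List Int) (i : Nat) : List Int :=
  if i < nums.length then
    match aInner nums i 0 i with
    | some (a, b) => [(a : Int), (b : Int)]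
    | none => aOuter nums (i + 1)
  else []
termination_by nums.length - i
def subarraySum_1 (nums : List Int) : List Int := aOuter nums 0
-- ===== PORT B =====
-- B's for-loop over enumerate(nums) with state (first, repeated, best, p)
def bGo (first : PySem.Dict Int Int) (repeated : PySem.Set Int)
    (best : Option (Int × Int)) (p : Int) : List (Int × Int) → List Int
  | [] =>
    match best with
    | none => []
    | some (f, k) => [f, k]
  | (k, x) :: rest =>
    let p' := p + x
    match first.get? p' with
    | some f =>
      if repeated.contains p' then
        bGo first repeated best p' rest
      else
        let repeated' := repeated.add p'
        let best' :=
          match best with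
          | none => some (f, k)
          | some (bf, bk) => if f < bf then some (f, k) else some (bf, bk)
        bGo first repeated' best' p' rest
    | none => bGo (first.insert p' (k + 1)) repeated best p' rest

def subarraySum_1_alt (nums : List Int) : List Int :=
  bGo (PySem.Dict.empty.insert 0 0) PySem.Set.empty none 0 (PySem.List.enumerate nums)

-- ===== PRECONDITION & SPEC =====
def Spec_subarraySum_1 (nums : List Int) (out : List Int) : Prop := out = subarraySum_1_alt nums
instance (nums : List Int) (out : List Int) : Decidable (Spec_subarraySum_1 nums out) := by unfold Spec_subarraySum_1; infer_instance

-- ===== CLAIM (what is proved, stated in full; the proofs are below) =====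
def Claim_equal_subarraySum_1 : Prop := ∀ (nums : List Int), Dom_subarraySum_1 nums → Spec_subarraySum_1 nums (subarraySum_1 nums)

-- ===== LEMMAS AND PROOFS =====

-- prefix sum of the first k elements
def psum (nums : List Int) (k : Nat) : Int := (nums.take k).sum
-- least j in [i, len) with psum (j+1) = psum i (A's partner search for start i)
def pairAt (nums : List Int) (i : Nat) : Option Nat :=
  (List.range' i (nums.length - i)).find? (fun j => psum nums (j + 1) == psum nums i)
def specHead (nums : List Int) : Option (Nat × Nat) :=
  ((List.range nums.length).filterMap (fun i => (pairAt nums i).map (fun j => (i, j)))).head?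
def render : Option (Nat × Nat) → List Int
  | none => []
  | some (a, b) => [(a : Int), (b : Int)]

-- candidate emitted at prefix index k when k is the second occurrence of its prefix value
def cand (nums : List Int) (k : Nat) : Option (Nat × Nat) :=
  if (List.range k).countP (fun k' => psum nums k' == psum nums k) = 1 then
    ((List.range k).find? (fun k' => psum nums k' == psum nums k)).map (fun f => (f, k - 1))
  else none

def candsUpTo (nums : List Int) (m : Nat) : List (Nat × Nat) :=
  (List.range (m + 1)).filterMap (cand nums)

def minFst : Option (Nat × Nat) → (Nat × Nat) → Option (Nat × Nat)
  | none, c => some c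
  | some (bf, bj), (f, j) => if f < bf then some (f, j) else some (bf, bj)

def bestSpec (nums : List Int) (m : Nat) : Option (Nat × Nat) :=
  (candsUpTo nums m).foldl minFst none

-- find? over range (n+1) in terms of find? over range n
theorem psum_succ (nums : List Int) (j : Nat) (h : j < nums.length) :
    psum nums (j + 1) = psum nums j + nums[j] := by
  unfold psum
  exact List.sum_take_succ nums j h

theorem inner_eq (nums : List Int) (i : Nat) (c : Int) :
    ∀ d j, nums.length - j = d →
      aInner nums i (c + psum nums j) j =
        ((List.range' j (nums.length - j)).find? (fun j' => c + psum nums (j' + 1) == 0)).map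
          (fun j' => (i, j')) := by
  intro d
  induction d with
  | zero =>
    intro j hd
    have h : ¬ j < nums.length := by omega
    rw [aInner, dif_neg h, hd]
    simp
  | succ d ih =>
    intro j hd
    have h : j < nums.length := by omega
    rw [aInner, dif_pos h, hd, List.range'_succ, List.find?_cons]
    have e : c + psum nums j + nums[j] = c + psum nums (j + 1) := by
      rw [psum_succ nums j h]; ring
    show (if c + psum nums j + nums[j] = 0 then some (i, j)
        else aInner nums i (c + psum nums j + nums[j]) (j + 1)) = _
    rw [e]
    by_cases h0 : c + psum nums (j + 1) = 0
    · have hb : (c + psum nums (j + 1) == 0) = true := by simpa using h0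
      rw [if_pos h0, hb]
      rfl
    · have hb : (c + psum nums (j + 1) == 0) = false := by simpa using h0
      rw [if_neg h0, hb]
      have h2 : nums.length - (j + 1) = d := by omega
      have := ih (j + 1) h2
      rw [h2] at this
      exact this

theorem inner_pairAt (nums : List Int) (i : Nat) :
    aInner nums i 0 i = (pairAt nums i).map (fun j => (i, j)) := by
  have h0 : (0 : Int) = -psum nums i + psum nums i := by ring
  rw [h0, inner_eq nums i (-psum nums i) (nums.length - i) i rfl]
  unfold pairAt
  have hf : (fun j' => -psum nums i + psum nums (j' + 1) == 0) =
      (fun j' => psum nums (j' + 1) == psum nums i) := by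
    funext j'
    by_cases h : psum nums (j' + 1) = psum nums i
    · have h1 : -psum nums i + psum nums (j' + 1) = 0 := by omega
      simp [h, h1]
    · have h1 : ¬ (-psum nums i + psum nums (j' + 1) = 0) := by omega
      simp [h, h1]
  rw [hf]

theorem outer_eq (nums : List Int) :
    ∀ d i, nums.length - i = d →
      aOuter nums i =
        render (((List.range' i (nums.length - i)).filterMap
          (fun i' => (pairAt nums i').map (fun j => (i', j)))).head?) := by
  intro d
  induction d with
  | zero =>
    intro i hd
    have h : ¬ i < nums.length := by omega
    rw [aOuter, if_neg h, hd]
    simp [render]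
  | succ d ih =>
    intro i hd
    have h : i < nums.length := by omega
    rw [aOuter, if_pos h, inner_pairAt, hd, List.range'_succ]
    cases hpa : pairAt nums i with
    | some j => simp [hpa, render]
    | none =>
      have hskip : (i :: List.range' (i + 1) d).filterMap
          (fun i' => (pairAt nums i').map (fun j => (i', j))) =
          (List.range' (i + 1) d).filterMap
          (fun i' => (pairAt nums i').map (fun j => (i', j))) := by
        simp [hpa]
      show aOuter nums (i + 1) = _
      rw [hskip]
      have h2 : nums.length - (i + 1) = d := by omega
      have := ih (i + 1) h2
      rw [h2] at this
      exact this

theorem subarraySum_1_A_eq : ∀ nums, subarraySum_1 nums = render (specHead nums) := by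
  intro nums
  unfold subarraySum_1 specHead
  rw [outer_eq nums (nums.length - 0) 0 rfl, List.range_eq_range']
  simp

theorem bGo_cons (first : PySem.Dict Int Int) (repeated : PySem.Set Int)
    (best : Option (Int × Int)) (p k x : Int) (rest : List (Int × Int)) :
    bGo first repeated best p ((k, x) :: rest) =
      (match first.get? (p + x) with
      | some f =>
        if repeated.contains (p + x) then
          bGo first repeated best (p + x) rest
        else
          bGo first (repeated.add (p + x))
            (match best with
            | none => some (f, k)
            | some (bf, bk) => if f < bf then some (f, k) else some (bf, bk))
            (p + x) rest
      | none => bGo (first.insert (p + x) (k + 1)) repeated best (p + x) rest) := rfl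

theorem bGo_cons_none (first : PySem.Dict Int Int) (repeated : PySem.Set Int)
    (best : Option (Int × Int)) (p k x : Int) (rest : List (Int × Int))
    (h : first.get? (p + x) = none) :
    bGo first repeated best p ((k, x) :: rest) =
      bGo (first.insert (p + x) (k + 1)) repeated best (p + x) rest := by
  rw [bGo_cons, h]

theorem bGo_cons_some (first : PySem.Dict Int Int) (repeated : PySem.Set Int)
    (best : Option (Int × Int)) (p k x f : Int) (rest : List (Int × Int))
    (h : first.get? (p + x) = some f) :
    bGo first repeated best p ((k, x) :: rest) =
      if repeated.contains (p + x) then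
        bGo first repeated best (p + x) rest
      else
        bGo first (repeated.add (p + x))
          (match best with
          | none => some (f, k)
          | some (bf, bk) => if f < bf then some (f, k) else some (bf, bk))
          (p + x) rest := by
  rw [bGo_cons, h]

theorem find?_range_succ (p : Nat → Bool) (n : Nat) :
    (List.range (n + 1)).find? p =
      ((List.range n).find? p).or (if p n then some n else none) := by
  rw [List.range_succ, List.find?_append]
  congr 1
  by_cases h : p n <;> simp [h]

theorem countP_range_succ (p : Nat → Bool) (n : Nat) :
    (List.range (n + 1)).countP p =
      (List.range n).countP p + (if p n then 1 else 0) := by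
  rw [List.range_succ, List.countP_append]
  by_cases h : p n <;> simp [h]


theorem hfirst_succ (nums : List Int) (m : Nat)
    (hsome : ((List.range (m + 1)).find? (fun k => psum nums k == psum nums (m + 1))).isSome) :
    ∀ w, (List.range (m + 1 + 1)).find? (fun k => psum nums k == w) =
      (List.range (m + 1)).find? (fun k => psum nums k == w) := by
  intro w
  rw [find?_range_succ]
  by_cases hw : psum nums (m + 1) = w
  · rw [← hw]
    obtain ⟨f₀, hf⟩ := Option.isSome_iff_exists.mp hsome
    simp [hf]
  · have hb : (psum nums (m + 1) == w) = false := by simpa using hw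
    simp [hb]

theorem candsUpTo_succ (nums : List Int) (m : Nat) :
    candsUpTo nums (m + 1) = candsUpTo nums m ++ (cand nums (m + 1)).toList := by
  unfold candsUpTo
  rw [List.range_succ, List.filterMap_append]
  congr 1

theorem bestSpec_succ_none (nums : List Int) (m : Nat) (h : cand nums (m + 1) = none) :
    bestSpec nums (m + 1) = bestSpec nums m := by
  unfold bestSpec
  rw [candsUpTo_succ, h]
  simp

theorem bestSpec_succ_some (nums : List Int) (m : Nat) (c : Nat × Nat)
    (h : cand nums (m + 1) = some c) :
    bestSpec nums (m + 1) = minFst (bestSpec nums m) c := by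
  unfold bestSpec
  rw [candsUpTo_succ, h]
  simp [List.foldl_append]

theorem bGo_inv (nums : List Int) :
    ∀ (rest : List Int) (m : Nat), m ≤ nums.length → nums.drop m = rest →
      ∀ (first : PySem.Dict Int Int) (repeated : PySem.Set Int) (best : Option (Int × Int)),
      (∀ v : Int, first.get? v =
          ((List.range (m + 1)).find? (fun k => psum nums k == v)).map (fun k => (k : Int))) →
      (∀ v : Int, repeated.contains v =
          decide (2 ≤ (List.range (m + 1)).countP (fun k => psum nums k == v))) →
      best = (bestSpec nums m).map (fun c => ((c.1 : Int), (c.2 : Int))) →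
      bGo first repeated best (psum nums m) (PySem.List.enumerate rest m) =
        render (bestSpec nums nums.length) := by
  intro rest
  induction rest with
  | nil =>
    intro m hmle hdrop first repeated best hfirst hrep hbest
    have hlen := congrArg List.length hdrop
    simp at hlen
    have hmn : m = nums.length := by omega
    rw [PySem.List.enumerate_nil, hbest, ← hmn]
    cases bestSpec nums m with
    | none => rfl
    | some c =>
      obtain ⟨f, j⟩ := c
      rfl
  | cons x rest' ih =>
    intro m hmle hdrop first repeated best hfirst hrep hbest
    have hlen := congrArg List.length hdrop
    simp at hlen
    have hm : m < nums.length := by omega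
    have hx : nums[m] = x := by
      have h1 : nums[m]? = some x := by
        have h2 := congrArg (fun l => l[0]?) hdrop
        simpa [List.getElem?_drop] using h2
      have h3 : nums[m]? = some nums[m] := List.getElem?_eq_getElem hm
      rw [h1] at h3
      exact (Option.some.inj h3).symm
    have hdrop' : nums.drop (m + 1) = rest' := by
      have h4 : List.drop 1 (List.drop m nums) = List.drop (m + 1) nums := List.drop_drop
      rw [hdrop] at h4
      simpa using h4.symm
    have hp' : psum nums m + x = psum nums (m + 1) := by
      rw [psum_succ nums m hm, hx]
    rw [PySem.List.enumerate_cons]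
    have hcast : (↑m : Int) + 1 = ((m + 1 : Nat) : Int) := by push_cast; ring
    cases hf : (List.range (m + 1)).find? (fun k => psum nums k == psum nums (m + 1)) with
    | none =>
      have hc0 : (List.range (m + 1)).countP (fun k => psum nums k == psum nums (m + 1)) = 0 := by
        rw [List.countP_eq_zero]
        intro a ha
        have h5 := List.find?_eq_none.mp hf a ha
        simpa using h5
      have hgn : first.get? (psum nums m + x) = none := by
        rw [hp', hfirst, hf]
        rfl
      rw [bGo_cons_none _ _ _ _ _ _ _ hgn, hp', hcast]
      exact ih (m + 1) (by omega) hdrop' _ _ _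
        (by
          intro w
          rw [PySem.Dict.get?_insert, find?_range_succ]
          by_cases hw : w = psum nums (m + 1)
          · subst hw
            simp [hf]
          · have hb : (psum nums (m + 1) == w) = false := by
              simpa using fun h => hw h.symm
            rw [if_neg hw, hfirst w, hb]
            simp)
        (by
          intro w
          rw [hrep w, countP_range_succ _ (m + 1)]
          by_cases hw : w = psum nums (m + 1)
          · subst hw
            rw [hc0]
            simp
          · have hb : (psum nums (m + 1) == w) = false := by
              simpa using fun h => hw h.symm
            rw [hb]
            simp)
        (by
          rw [hbest, bestSpec_succ_none]
          unfold cand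
          rw [if_neg (by omega)])
    | some f₀ =>
      have hmem := List.mem_of_find?_eq_some hf
      have hpf : (psum nums f₀ == psum nums (m + 1)) = true := by
        have h6 := List.find?_some hf
        simpa using h6
      have hcnt1 : 0 < (List.range (m + 1)).countP (fun k => psum nums k == psum nums (m + 1)) := by
        rcases Nat.eq_zero_or_pos ((List.range (m + 1)).countP (fun k => psum nums k == psum nums (m + 1))) with h0 | hpos
        · exact absurd hpf (by simpa using List.countP_eq_zero.mp h0 f₀ hmem)
        · exact hpos
      have hgs : first.get? (psum nums m + x) = some ((f₀ : Int)) := by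
        rw [hp', hfirst, hf]
        rfl
      rw [bGo_cons_some _ _ _ _ _ _ _ _ hgs, hp']
      rw [hrep (psum nums (m + 1))]
      by_cases h2 : 2 ≤ (List.range (m + 1)).countP (fun k => psum nums k == psum nums (m + 1))
      · rw [decide_eq_true h2, if_pos rfl]
        exact ih (m + 1) (by omega) hdrop' _ _ _
          (by
            intro w
            rw [hfirst_succ nums m (by simp [hf]) w]
            exact hfirst w)
          (by
            intro w
            rw [hrep w, countP_range_succ _ (m + 1)]
            by_cases hw : w = psum nums (m + 1)
            · subst hw
              simp only [beq_self_eq_true, if_pos]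
              have hA : (2 ≤ (List.range (m + 1)).countP (fun k => psum nums k == psum nums (m + 1))) := h2
              simp only [decide_eq_decide]
              constructor <;> intro <;> omega
            · have hb : (psum nums (m + 1) == w) = false := by
                simpa using fun h => hw h.symm
              rw [hb]
              simp)
          (by
            rw [hbest, bestSpec_succ_none]
            unfold cand
            rw [if_neg (by omega)])
      · have hc1 : (List.range (m + 1)).countP (fun k => psum nums k == psum nums (m + 1)) = 1 := by
          omega
        rw [decide_eq_false h2, if_neg Bool.false_ne_true]
        have hcand : cand nums (m + 1) = some (f₀, m) := by
          unfold cand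
          rw [if_pos hc1, hf]
          simp
        exact ih (m + 1) (by omega) hdrop' _ _ _
          (by
            intro w
            rw [hfirst_succ nums m (by simp [hf]) w]
            exact hfirst w)
          (by
            intro w
            rw [countP_range_succ _ (m + 1)]
            by_cases hw : w = psum nums (m + 1)
            · subst hw
              simp only [beq_self_eq_true, if_pos]
              have hmemadd : psum nums (m + 1) ∈ repeated.add (psum nums (m + 1)) :=
                (PySem.Set.mem_add _ _ _).mpr (Or.inr rfl)
              have hT : (repeated.add (psum nums (m + 1))).contains (psum nums (m + 1)) = true :=
                (PySem.Set.contains_iff _ _).mpr hmemadd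
              rw [hT, hc1]
              simp
            · have hb : (psum nums (m + 1) == w) = false := by
                simpa using fun h => hw h.symm
              rw [hb]
              have hC : (repeated.add (psum nums (m + 1))).contains w = repeated.contains w := by
                cases hcw : repeated.contains w with
                | true =>
                  exact (PySem.Set.contains_iff _ _).mpr
                    ((PySem.Set.mem_add _ _ _).mpr (Or.inl ((PySem.Set.contains_iff _ _).mp hcw)))
                | false =>
                  apply Bool.eq_false_iff.mpr
                  intro habs
                  rcases (PySem.Set.mem_add _ _ _).mp ((PySem.Set.contains_iff _ _).mp habs) with h' | h'
                  · have ht := (PySem.Set.contains_iff _ _).mpr h'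
                    rw [ht] at hcw
                    simp at hcw
                  · exact hw h'
              rw [hC, hrep w]
              simp)
          (by
            rw [hbest, bestSpec_succ_some nums m (f₀, m) hcand]
            cases hb : bestSpec nums m with
            | none =>
              simp [minFst]
            | some c =>
              obtain ⟨bf₀, bj₀⟩ := c
              simp only [Option.map_some, minFst]
              by_cases hlt : f₀ < bf₀
              · rw [if_pos (by exact_mod_cast hlt), if_pos hlt]
                simp
              · rw [if_neg (by exact_mod_cast hlt), if_neg hlt]
                simp)

theorem subarraySum_1_B_eq : ∀ nums, subarraySum_1_alt nums = render (bestSpec nums nums.length) := by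
  intro nums
  unfold subarraySum_1_alt
  exact bGo_inv nums nums 0 (by omega) (by simp)
    (PySem.Dict.empty.insert 0 0) PySem.Set.empty none
    (by
      intro w
      rw [PySem.Dict.get?_insert]
      by_cases hw : w = 0
      · subst hw
        have : psum nums 0 = 0 := rfl
        simp [this]
      · rw [if_neg hw]
        have hb : (psum nums 0 == w) = false := by
          have : psum nums 0 = 0 := rfl
          rw [this]
          simpa using fun h => hw h.symm
        simp [PySem.Dict.get?_empty, hb])
    (by
      intro w
      have hle : (List.range 1).countP (fun k => psum nums k == w) ≤ 1 := by
        simpa using List.countP_le_length (p := fun k => psum nums k == w) (l := List.range 1)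
      have hd : decide (2 ≤ (List.range 1).countP (fun k => psum nums k == w)) = false :=
        decide_eq_false (by omega)
      rw [hd]
      rfl)
    (by
      have hc : cand nums 0 = none := by
        unfold cand
        simp
      unfold bestSpec candsUpTo
      simp [hc])

theorem find?_range'_some {p : Nat → Bool} :
    ∀ d s f, (List.range' s d).find? p = some f →
      s ≤ f ∧ f < s + d ∧ p f = true ∧ ∀ x, s ≤ x → x < f → p x = false := by
  intro d
  induction d with
  | zero => intro s f h; simp at h
  | succ d ih =>
    intro s f h
    rw [List.range'_succ, List.find?_cons] at h
    cases hs : p s with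
    | true =>
      rw [hs] at h
      have hsf : s = f := by
        have h' : some s = some f := h
        exact Option.some.inj h'
      subst hsf
      exact ⟨le_refl _, by omega, hs, by omega⟩
    | false =>
      rw [hs] at h
      have h' : (List.range' (s + 1) d).find? p = some f := h
      obtain ⟨h1, h2, h3, h4⟩ := ih (s + 1) f h'
      refine ⟨by omega, by omega, h3, ?_⟩
      intro x hx1 hx2
      rcases Nat.eq_or_lt_of_le hx1 with he | hl
      · rw [← he]; exact hs
      · exact h4 x hl hx2

theorem find?_range'_some_of {p : Nat → Bool} :
    ∀ d s f, s ≤ f → f < s + d → p f = true → (∀ x, s ≤ x → x < f → p x = false) →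
      (List.range' s d).find? p = some f := by
  intro d
  induction d with
  | zero => intro s f h1 h2; omega
  | succ d ih =>
    intro s f h1 h2 h3 h4
    rw [List.range'_succ, List.find?_cons]
    rcases Nat.eq_or_lt_of_le h1 with he | hl
    · rw [← he] at h3
      rw [h3]
      show some s = some f
      rw [he]
    · have hps : p s = false := h4 s (le_refl _) hl
      rw [hps]
      show (List.range' (s + 1) d).find? p = some f
      exact ih (s + 1) f hl (by omega) h3 (fun x hx1 hx2 => h4 x (by omega) hx2)

theorem find?_range_some {p : Nat → Bool} {n f : Nat} (h : (List.range n).find? p = some f) :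
    f < n ∧ p f = true ∧ ∀ x, x < f → p x = false := by
  rw [List.range_eq_range'] at h
  obtain ⟨_, h2, h3, h4⟩ := find?_range'_some n 0 f h
  exact ⟨by omega, h3, fun x hx => h4 x (by omega) hx⟩

theorem find?_range_some_of {p : Nat → Bool} {n f : Nat} (h1 : f < n) (h2 : p f = true)
    (h3 : ∀ x, x < f → p x = false) : (List.range n).find? p = some f := by
  rw [List.range_eq_range']
  exact find?_range'_some_of n 0 f (by omega) (by omega) h2 (fun x _ hx => h3 x hx)

theorem head?_filterMap_range' {β : Type} {f : Nat → Option β} :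
    ∀ d s b, ((List.range' s d).filterMap f).head? = some b →
      ∃ i, s ≤ i ∧ i < s + d ∧ f i = some b ∧ ∀ x, s ≤ x → x < i → f x = none := by
  intro d
  induction d with
  | zero => intro s b h; simp at h
  | succ d ih =>
    intro s b h
    rw [List.range'_succ] at h
    cases hs : f s with
    | some c =>
      rw [List.filterMap_cons_some hs] at h
      simp at h
      exact ⟨s, le_refl _, by omega, by rw [hs, h], by omega⟩
    | none =>
      rw [List.filterMap_cons_none hs] at h
      obtain ⟨i, h1, h2, h3, h4⟩ := ih (s + 1) b h
      refine ⟨i, by omega, by omega, h3, ?_⟩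
      intro x hx1 hx2
      rcases Nat.eq_or_lt_of_le hx1 with he | hl
      · rw [← he]; exact hs
      · exact h4 x hl hx2

-- foldl minFst facts
theorem minFst_isSome (acc : Option (Nat × Nat)) (c : Nat × Nat) : (minFst acc c).isSome := by
  cases acc with
  | none => rfl
  | some b =>
    obtain ⟨bf, bj⟩ := b
    obtain ⟨f, j⟩ := c
    show (if f < bf then some (f, j) else some (bf, bj)).isSome = true
    by_cases h : f < bf
    · rw [if_pos h]; rfl
    · rw [if_neg h]; rfl

theorem foldl_minFst_isSome (l : List (Nat × Nat)) :
    ∀ acc : Option (Nat × Nat), acc.isSome → (l.foldl minFst acc).isSome := by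
  induction l with
  | nil => intro acc h; simpa using h
  | cons c rest ih => intro acc _; exact ih (minFst acc c) (minFst_isSome acc c)

theorem foldl_minFst_some (l : List (Nat × Nat)) :
    ∀ acc e, l.foldl minFst acc = some e →
      (acc = some e ∨ e ∈ l) ∧ (∀ a, acc = some a → e.1 ≤ a.1) ∧ (∀ x ∈ l, e.1 ≤ x.1) := by
  induction l with
  | nil =>
    intro acc e h
    simp at h
    refine ⟨Or.inl h, fun a ha => ?_, by simp⟩
    rw [h] at ha
    cases ha
    exact le_refl _
  | cons c rest ih =>
    intro acc e h
    obtain ⟨h1, h2, h3⟩ := ih (minFst acc c) e h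
    cases acc with
    | none =>
      have hmc : minFst none c = some c := rfl
      rw [hmc] at h1 h2
      refine ⟨?_, by simp, ?_⟩
      · rcases h1 with h1 | h1
        · exact Or.inr (by simp [Option.some.inj h1])
        · exact Or.inr (List.mem_cons_of_mem _ h1)
      · intro x hx
        rcases List.mem_cons.mp hx with hx | hx
        · rw [hx]; exact h2 c rfl
        · exact h3 x hx
    | some b =>
      obtain ⟨bf, bj⟩ := b
      obtain ⟨cf, cj⟩ := c
      by_cases hlt : cf < bf
      · have hmc : minFst (some (bf, bj)) (cf, cj) = some (cf, cj) := by
          show (if cf < bf then some (cf, cj) else some (bf, bj)) = some (cf, cj)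
          rw [if_pos hlt]
        rw [hmc] at h1 h2
        have hec : e.1 ≤ cf := h2 (cf, cj) rfl
        refine ⟨?_, ?_, ?_⟩
        · rcases h1 with h1 | h1
          · exact Or.inr (by simp [Option.some.inj h1])
          · exact Or.inr (List.mem_cons_of_mem _ h1)
        · intro a ha
          cases Option.some.inj ha
          simp only []
          omega
        · intro x hx
          rcases List.mem_cons.mp hx with hx | hx
          · rw [hx]; exact hec
          · exact h3 x hx
      · have hmc : minFst (some (bf, bj)) (cf, cj) = some (bf, bj) := by
          show (if cf < bf then some (cf, cj) else some (bf, bj)) = some (bf, bj)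
          rw [if_neg hlt]
        rw [hmc] at h1 h2
        have heb : e.1 ≤ bf := h2 (bf, bj) rfl
        refine ⟨?_, ?_, ?_⟩
        · rcases h1 with h1 | h1
          · exact Or.inl h1
          · exact Or.inr (List.mem_cons_of_mem _ h1)
        · intro a ha
          cases Option.some.inj ha
          exact heb
        · intro x hx
          rcases List.mem_cons.mp hx with hx | hx
          · rw [hx]
            simp only []
            omega
          · exact h3 x hx

theorem mem_candsUpTo {nums : List Int} {m : Nat} {e : Nat × Nat} :
    e ∈ candsUpTo nums m ↔ ∃ k, k ≤ m ∧ cand nums k = some e := by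
  unfold candsUpTo
  rw [List.mem_filterMap]
  constructor
  · rintro ⟨k, hk, hc⟩
    exact ⟨k, by simpa using List.mem_range.mp hk, hc⟩
  · rintro ⟨k, hk, hc⟩
    exact ⟨k, List.mem_range.mpr (by omega), hc⟩

theorem two_le_countP {l : List Nat} {p : Nat → Bool} {a b : Nat}
    (ha : a ∈ l) (hb : b ∈ l) (hne : a ≠ b) (hpa : p a = true) (hpb : p b = true) :
    2 ≤ l.countP p := by
  have hfa : a ∈ l.filter p := List.mem_filter.mpr ⟨ha, hpa⟩
  have hfb : b ∈ l.filter p := List.mem_filter.mpr ⟨hb, hpb⟩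
  have h2 : 1 < (l.filter p).toFinset.card :=
    Finset.one_lt_card.mpr ⟨a, List.mem_toFinset.mpr hfa, b, List.mem_toFinset.mpr hfb, hne⟩
  have h3 : (l.filter p).toFinset.card ≤ (l.filter p).length := (l.filter p).toFinset_card_le
  rw [List.countP_eq_length_filter]
  omega

theorem cand_some {nums : List Int} {k f j : Nat} (h : cand nums k = some (f, j)) :
    (List.range k).countP (fun k' => psum nums k' == psum nums k) = 1 ∧
    (List.range k).find? (fun k' => psum nums k' == psum nums k) = some f ∧ j = k - 1 := by
  unfold cand at h
  by_cases hc : (List.range k).countP (fun k' => psum nums k' == psum nums k) = 1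
  · rw [if_pos hc] at h
    cases hfk : (List.range k).find? (fun k' => psum nums k' == psum nums k) with
    | none => rw [hfk] at h; simp at h
    | some f' =>
      rw [hfk] at h
      simp at h
      refine ⟨hc, ?_, h.2.symm⟩
      exact congrArg some h.1
  · rw [if_neg hc] at h
    simp at h

theorem bridge (nums : List Int) : bestSpec nums nums.length = specHead nums := by
  cases hA : specHead nums with
  | none =>
    have hlist : ((List.range nums.length).filterMap
        (fun i => (pairAt nums i).map (fun j => (i, j)))) = [] :=
      List.head?_eq_none_iff.mp hA
    have hall : ∀ i, i < nums.length → pairAt nums i = none := by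
      intro i hi
      have h2 := (List.filterMap_eq_nil_iff).mp hlist i (List.mem_range.mpr hi)
      cases hp : pairAt nums i with
      | none => rfl
      | some j => rw [hp] at h2; simp at h2
    have hcands : candsUpTo nums nums.length = [] := by
      unfold candsUpTo
      rw [List.filterMap_eq_nil_iff]
      intro k hk
      cases hc : cand nums k with
      | none => rfl
      | some e =>
        exfalso
        obtain ⟨f, j⟩ := e
        obtain ⟨hcnt, hfind, hj⟩ := cand_some hc
        obtain ⟨hfk, hpf, _⟩ := find?_range_some hfind
        have hval : psum nums f = psum nums k := by simpa using hpf
        have hkn : k ≤ nums.length := by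
          have := List.mem_range.mp hk
          omega
        have hjmem : (k - 1) ∈ List.range' f (nums.length - f) :=
          List.mem_range'_1.mpr ⟨by omega, by omega⟩
        have hsome : ((List.range' f (nums.length - f)).find?
            (fun j => psum nums (j + 1) == psum nums f)).isSome := by
          rw [List.find?_isSome]
          refine ⟨k - 1, hjmem, ?_⟩
          have hkk : k - 1 + 1 = k := by omega
          rw [hkk]
          simpa using hval.symm
        have hnone := hall f (by omega)
        unfold pairAt at hnone
        rw [hnone] at hsome
        simp at hsome
    unfold bestSpec
    rw [hcands]
    rfl
  | some e0 =>
    obtain ⟨i0, j0⟩ := e0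
    have hH : ∃ i, 0 ≤ i ∧ i < 0 + nums.length ∧
        ((pairAt nums i).map (fun j => (i, j))) = some (i0, j0) ∧
        ∀ x, 0 ≤ x → x < i → ((pairAt nums x).map (fun j => (x, j))) = none := by
      unfold specHead at hA
      rw [List.range_eq_range'] at hA
      exact head?_filterMap_range' nums.length 0 (i0, j0) hA
    obtain ⟨i, _, hin, hfi, hfx⟩ := hH
    have hpair : pairAt nums i = some j0 ∧ i = i0 := by
      cases hp : pairAt nums i with
      | none => rw [hp] at hfi; simp at hfi
      | some j =>
        rw [hp] at hfi
        simp at hfi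
        exact ⟨by rw [hfi.2], hfi.1⟩
    obtain ⟨hpA, hii⟩ := hpair
    subst hii
    have hi0n : i < nums.length := by omega
    have hmin : ∀ x, x < i → pairAt nums x = none := by
      intro x hx
      have h2 := hfx x (by omega) hx
      cases hp : pairAt nums x with
      | none => rfl
      | some j => rw [hp] at h2; simp at h2
    unfold pairAt at hpA
    obtain ⟨hij, hjn', hpj, hfirstj⟩ := find?_range'_some _ i j0 hpA
    have hjn : j0 < nums.length := by omega
    have hv : psum nums (j0 + 1) = psum nums i := by simpa using hpj
    have hnoclow : ∀ x, x < i → psum nums x ≠ psum nums i := by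
      intro x hx hcontra
      have h1 := hmin x hx
      unfold pairAt at h1
      have h2 := List.find?_eq_none.mp h1 j0 (List.mem_range'_1.mpr ⟨by omega, by omega⟩)
      simp at h2
      exact h2 (by rw [hv, hcontra])
    have hnocmid : ∀ x, i < x → x ≤ j0 → psum nums x ≠ psum nums i := by
      intro x h1 h2 hcontra
      have h3 := hfirstj (x - 1) (by omega) (by omega)
      have h4 : x - 1 + 1 = x := by omega
      rw [h4] at h3
      simp at h3
      exact h3 hcontra
    have hcnt1 : (List.range (j0 + 1)).countP
        (fun k' => psum nums k' == psum nums (j0 + 1)) = 1 := by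
      have hcong : ∀ k' ∈ List.range (j0 + 1),
          ((psum nums k' == psum nums (j0 + 1)) = (k' == i)) := by
        intro k' hk'
        have hk'lt : k' < j0 + 1 := List.mem_range.mp hk'
        by_cases he : k' = i
        · subst he; simp [hv]
        · have hne : psum nums k' ≠ psum nums (j0 + 1) := by
            rw [hv]
            rcases Nat.lt_or_ge k' i with h | h
            · exact hnoclow k' h
            · exact hnocmid k' (by omega) (by omega)
          simp [hne, he]
      rw [List.countP_congr (fun a ha => by rw [hcong a ha])]
      have : (List.range (j0 + 1)).countP (fun k' => k' == i) = (List.range (j0 + 1)).count i := rfl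
      rw [this]
      exact List.count_eq_one_of_mem (List.nodup_range) (List.mem_range.mpr (by omega))
    have hfind : (List.range (j0 + 1)).find?
        (fun k' => psum nums k' == psum nums (j0 + 1)) = some i := by
      apply find?_range_some_of (by omega) (by simp [hv])
      intro x hx
      have := hnoclow x hx
      rw [hv]
      simpa using this
    have hcand : cand nums (j0 + 1) = some (i, j0) := by
      unfold cand
      rw [if_pos hcnt1, hfind]
      simp
    have hmem0 : (i, j0) ∈ candsUpTo nums nums.length :=
      mem_candsUpTo.mpr ⟨j0 + 1, by omega, hcand⟩
    have hne : candsUpTo nums nums.length ≠ [] := by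
      intro h
      rw [h] at hmem0
      simp at hmem0
    have hsome : (bestSpec nums nums.length).isSome := by
      unfold bestSpec
      cases hc : candsUpTo nums nums.length with
      | nil => exact absurd hc hne
      | cons c t =>
        rw [List.foldl_cons]
        exact foldl_minFst_isSome t (minFst none c) (minFst_isSome none c)
    obtain ⟨e, he⟩ := Option.isSome_iff_exists.mp hsome
    have he' : (candsUpTo nums nums.length).foldl minFst none = some e := he
    obtain ⟨hmem, _, hle⟩ := foldl_minFst_some _ none e he'
    have hememb : e ∈ candsUpTo nums nums.length := by
      rcases hmem with h | h
      · simp at h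
      · exact h
    obtain ⟨k, hkn, hck⟩ := mem_candsUpTo.mp hememb
    obtain ⟨f, j⟩ := e
    obtain ⟨hcntk, hfindk, hjk⟩ := cand_some hck
    obtain ⟨hfk, hpfk, hffirst⟩ := find?_range_some hfindk
    have hvfk : psum nums f = psum nums k := by simpa using hpfk
    have h1 : f ≤ i := hle (i, j0) hmem0
    have h2 : ¬ f < i := by
      intro hf0
      have hn := hmin f hf0
      unfold pairAt at hn
      have h3 := List.find?_eq_none.mp hn (k - 1)
        (List.mem_range'_1.mpr ⟨by omega, by omega⟩)
      simp at h3
      have h4 : k - 1 + 1 = k := by omega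
      rw [h4] at h3
      exact h3 hvfk.symm
    have hfi0 : f = i := by omega
    have hvk : psum nums k = psum nums f := hvfk.symm
    have hk1 : k ≤ j0 + 1 := by
      by_contra hgt
      rw [Nat.not_le] at hgt
      have h2le := two_le_countP (l := List.range k)
        (p := fun k' => psum nums k' == psum nums k)
        (List.mem_range.mpr (by omega : f < k)) (List.mem_range.mpr (by omega : j0 + 1 < k))
        (by omega)
        (by show (psum nums f == psum nums k) = true
            simpa using hvk.symm)
        (by show (psum nums (j0 + 1) == psum nums k) = true
            rw [hv, ← hfi0]
            simpa using hvk.symm)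
      omega
    have hk2 : j0 + 1 ≤ k := by
      by_contra hlt
      rw [Nat.not_le] at hlt
      refine hnocmid k (by omega) (by omega) ?_
      rw [← hfi0]
      exact hvk
    have hkj : k = j0 + 1 := by omega
    have hj : j = j0 := by omega
    rw [he, hj, hfi0]

theorem subarraySum_1_bridge (nums : List Int) :
    render (bestSpec nums nums.length) = render (specHead nums) := by
  rw [bridge]

-- ===== VERDICT (by name: the statement is the Claim_ definition above) =====
theorem subarraySum_1_spec : Claim_equal_subarraySum_1 := by
  intro nums _
  show subarraySum_1 nums = subarraySum_1_alt nums
  rw [subarraySum_1_A_eq, subarraySum_1_B_eq, subarraySum_1_bridge]
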